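-- pv_equiv track=rewrite | github.com/limminjeong98/programmers-solutions | weekly_challenge/1주차_부족한금액계산하기.py | solution
-- ===== SOURCE A (Python) =====
-- def solution(price, money, count):
--     total, answer = 0, 0
--     for i in range(1, count+1):
--         total += i
--     answer = total * price - money
--     if answer < 0:
--         answer = 0
--     return answer
-- ===== SOURCE B (Python) =====
-- def solution(price, money, count):
--     n = count if count > 0 else 0
--     shortfall = n * (n + 1) // 2 * price - money
--     return shortfall if shortfall > 0 else 0
-- ===== Notes on version B (the rewrite author's own statement) =====
-- stated objective: faster
-- what changed: replaces the O(count) summation loop with the closed-form arithmetic-series formula n*(n+1)//2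
import Mathlib
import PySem

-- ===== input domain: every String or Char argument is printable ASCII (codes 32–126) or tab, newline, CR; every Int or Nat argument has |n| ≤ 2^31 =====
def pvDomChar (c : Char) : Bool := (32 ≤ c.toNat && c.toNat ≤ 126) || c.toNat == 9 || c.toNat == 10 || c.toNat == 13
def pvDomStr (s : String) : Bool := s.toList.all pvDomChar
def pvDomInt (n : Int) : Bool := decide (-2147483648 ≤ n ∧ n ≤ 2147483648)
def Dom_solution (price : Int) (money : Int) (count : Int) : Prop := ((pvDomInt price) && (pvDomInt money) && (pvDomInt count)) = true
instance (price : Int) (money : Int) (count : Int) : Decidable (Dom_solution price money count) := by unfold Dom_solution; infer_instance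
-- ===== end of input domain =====

-- B replaces A's O(count) summation loop by the closed-form n*(n+1)//2 (asymptotically faster).


-- ===== PORT A =====
def solution (price : Int) (money : Int) (count : Int) : Int :=
  let total : Int := (PySem.List.pyRange 1 (count + 1) 1).foldl (fun t i => t + i) 0
  let answer : Int := total * price - money
  if answer < 0 then 0 else answer

-- ===== PORT B =====
def solution_alt (price : Int) (money : Int) (count : Int) : Int :=
  let n : Int := if count > 0 then count else 0
  let shortfall : Int := PySem.Int.floordiv (n * (n + 1)) 2 * price - money
  if shortfall > 0 then shortfall else 0

-- ===== PRECONDITION & SPEC =====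
def Spec_solution (price : Int) (money : Int) (count : Int) (out : Int) : Prop := out = solution_alt price money count
instance (price : Int) (money : Int) (count : Int) (out : Int) : Decidable (Spec_solution price money count out) := by unfold Spec_solution; infer_instance

-- ===== CLAIM (what is proved, stated in full; the proofs are below) =====
def Claim_equal_solution : Prop := ∀ (price : Int) (money : Int) (count : Int), Dom_solution price money count → Spec_solution price money count (solution price money count)

-- ===== LEMMAS AND PROOFS =====

-- twice the running sum of 1..m equals m*(m+1)
theorem pv_sum_range (m : Nat) :
    (((List.range m).map (fun k : Nat => (1 : Int) + (k : Int))).foldl (fun t i => t + i) 0) * 2 = (m : Int) * ((m : Int) + 1) := by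
  induction m with
  | zero => simp
  | succ m ih =>
    rw [List.range_succ, List.map_append, List.foldl_append]
    simp only [List.map_cons, List.map_nil, List.foldl_cons, List.foldl_nil]
    push_cast at ih ⊢
    linarith

theorem pv_total_eq (count : Int) :
    (PySem.List.pyRange 1 (count + 1) 1).foldl (fun t i => t + i) 0 =
      PySem.Int.floordiv ((if count > 0 then count else 0) * ((if count > 0 then count else 0) + 1)) 2 := by
  rw [PySem.List.pyRange_one]
  have h := pv_sum_range (count + 1 - 1).toNat
  set T := (((List.range (count + 1 - 1).toNat).map (fun k : Nat => (1 : Int) + (k : Int))).foldl (fun t i => t + i) 0) with hT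
  have hn : ((count + 1 - 1).toNat : Int) = if count > 0 then count else 0 := by
    split_ifs with hc <;> omega
  rw [← hn]
  have : ((count + 1 - 1).toNat : Int) * (((count + 1 - 1).toNat : Int) + 1) = T * 2 := by
    linarith [h]
  rw [this]
  unfold PySem.Int.floordiv
  rw [Int.mul_fdiv_cancel T (by norm_num)]

theorem solution_eq_alt (price money count : Int) :
    solution price money count = solution_alt price money count := by
  unfold solution solution_alt
  rw [pv_total_eq count]
  dsimp only
  split_ifs <;> omega

-- ===== VERDICT (by name: the statement is the Claim_ definition above) =====
theorem solution_spec : Claim_equal_solution := by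
  intro price money count _
  exact solution_eq_alt price money count
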